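-- pv_equiv track=rewrite | github.com/alexmickelson/romanNumeralKata | romanNumerals.py | simplify_decimal_list
-- ===== SOURCE A (Python) =====
-- from typing import List
--
-- def simplify_decimal_list(roman_decimals: List[int]) -> List[int]:
--     simple_decimals: List[int] = []
--     while (len(roman_decimals) > 0):
--         numeral_end_index = length_of_next_numeral(roman_decimals)
--
--         simple_number = simplify_numeral_by_subtraction(
--                             roman_decimals[0:numeral_end_index])
--         simple_decimals.append(simple_number)
--
--         roman_decimals = roman_decimals[numeral_end_index: len(roman_decimals)]
--     return simple_decimals
--
-- def length_of_next_numeral(roman_decimals: List[int]) -> int: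
--     if (roman_decimals[0] >= max(roman_decimals)):
--         return 1
--     else:
--         return roman_decimals.index(max(roman_decimals))+1
--
-- def simplify_numeral_by_subtraction(roman_decimals: List[int]) -> int:
--     if(len(roman_decimals) == 1):
--         return roman_decimals[0]
--
--     calculated_value: int = max(roman_decimals)
--     roman_decimals.remove(calculated_value)
--
--     for number in roman_decimals:
--         calculated_value -= number
--
--     return calculated_value
-- ===== SOURCE B (Python) =====
-- from typing import List
--
-- def simplify_decimal_list(roman_decimals: List[int]) -> List[int]:
--     n = len(roman_decimals)
--     # suff[k] = max(roman_decimals[k:]) (None when that slice is empty): one right-to-left pass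
--     suff = [None] * (n + 1)
--     for k in range(n - 1, -1, -1):
--         m = roman_decimals[k]
--         nxt = suff[k + 1]
--         if nxt is not None and nxt > m:
--             m = nxt
--         suff[k] = m
--     # one left-to-right pass: a value >= every later value closes the current
--     # numeral; it is the numeral's maximum and the accumulated earlier values
--     # of the numeral are subtracted from it
--     out = []
--     acc = 0
--     for k in range(n):
--         x = roman_decimals[k]
--         nxt = suff[k + 1]
--         if nxt is None or x >= nxt:
--             out.append(x - acc)
--             acc = 0
--         else:
--             acc += x
--     return out
-- ===== Notes on version B (the rewrite author's own statement) =====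
-- stated objective: faster
-- what changed: A repeatedly slices the list, recomputes max/index over each slice and removes the max before a subtracting loop (quadratic rescans); B precomputes suffix maxima in one right-to-left pass and emits each numeral's value in a single left-to-right pass with a running subtrahend.
import Mathlib
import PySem

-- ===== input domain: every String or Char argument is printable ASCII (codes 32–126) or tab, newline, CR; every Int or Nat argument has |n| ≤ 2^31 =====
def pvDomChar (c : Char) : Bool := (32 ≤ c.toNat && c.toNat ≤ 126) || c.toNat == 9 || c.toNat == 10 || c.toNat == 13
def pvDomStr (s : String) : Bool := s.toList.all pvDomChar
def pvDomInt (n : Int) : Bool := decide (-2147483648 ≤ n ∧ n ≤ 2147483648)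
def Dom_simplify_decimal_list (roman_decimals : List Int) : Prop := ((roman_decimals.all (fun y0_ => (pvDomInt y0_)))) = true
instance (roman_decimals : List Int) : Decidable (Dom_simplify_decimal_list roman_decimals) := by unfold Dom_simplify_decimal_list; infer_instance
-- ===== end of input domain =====

-- B replaces A's quadratic slice-max-index-remove loop by one right-to-left suffix-maximum
-- pass plus one left-to-right subtracting pass (objective: faster, asymptotic).


-- ===== PORT A =====
-- Python max(xs) (no key) is PySem.List.max? xs (fun y => y).
def length_of_next_numeral (roman_decimals : List Int) : Nat :=
  match PySem.List.max? roman_decimals (fun y => y) with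
  | none => 1   -- unreachable: Python's max([]) raises; every caller passes a nonempty list
  | some m =>
    if (PySem.List.pyGet? roman_decimals 0).getD 0 ≥ m then 1
    else (PySem.List.index? roman_decimals m).getD 0 + 1

def simplify_numeral_by_subtraction (roman_decimals : List Int) : Int :=
  if roman_decimals.length = 1 then (PySem.List.pyGet? roman_decimals 0).getD 0
  else
    match PySem.List.max? roman_decimals (fun y => y) with
    | none => 0   -- unreachable: Python's max([]) raises; every caller passes a nonempty list
    | some m =>
      ((PySem.List.remove? roman_decimals m).getD roman_decimals).foldl
        (fun calculated_value number => calculated_value - number) m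

-- needed by the port's decreasing_by: each step consumes at least one element
lemma length_of_next_numeral_pos (l : List Int) : 1 ≤ length_of_next_numeral l := by
  unfold length_of_next_numeral
  split
  · exact le_refl 1
  · split
    · exact le_refl 1
    · omega

-- Python's slices xs[0:e] and xs[e:len(xs)] with the Nat e are xs.take e and xs.drop e.
def simplify_decimal_list (roman_decimals : List Int) : List Int :=
  if 0 < roman_decimals.length then
    -- numeral_end_index = length_of_next_numeral roman_decimals (Python's local, used twice)
    simplify_numeral_by_subtraction (roman_decimals.take (length_of_next_numeral roman_decimals)) ::
      simplify_decimal_list (roman_decimals.drop (length_of_next_numeral roman_decimals))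
  else []
termination_by roman_decimals.length
decreasing_by
  have := length_of_next_numeral_pos roman_decimals
  simp only [List.length_drop]
  omega

-- ===== PORT B =====
-- Source B builds suff, with suff[k] = max(roman_decimals[k:]) and suff[n] = None, by one
-- backwards loop; ported as structural recursion producing that list (length n+1, last = none).
def suffix_maxes (l : List Int) : List (Option Int) :=
  match l with
  | [] => [none]
  | x :: xs =>
    let rest := suffix_maxes xs
    let m : Int :=
      match rest.headD none with
      | some nxt => if nxt > x then nxt else x
      | none => x
    some m :: rest

-- the left-to-right loop of Source B: walks the values alongside suff[k+1], keeping acc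
def sweep : List Int → List (Option Int) → Int → List Int
  | [], _, _ => []
  | x :: rest, suffs, acc =>
    match suffs.headD none with
    | none => (x - acc) :: sweep rest suffs.tail 0
    | some nxt =>
      if x ≥ nxt then (x - acc) :: sweep rest suffs.tail 0
      else sweep rest suffs.tail (acc + x)

def simplify_decimal_list_alt (roman_decimals : List Int) : List Int :=
  sweep roman_decimals (suffix_maxes roman_decimals).tail 0

-- ===== PRECONDITION & SPEC =====
def Spec_simplify_decimal_list (roman_decimals : List Int) (out : List Int) : Prop := out = simplify_decimal_list_alt roman_decimals
instance (roman_decimals : List Int) (out : List Int) : Decidable (Spec_simplify_decimal_list roman_decimals out) := by unfold Spec_simplify_decimal_list; infer_instance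

-- ===== CLAIM (what is proved, stated in full; the proofs are below) =====
def Claim_equal_simplify_decimal_list : Prop := ∀ (roman_decimals : List Int), Dom_simplify_decimal_list roman_decimals → Spec_simplify_decimal_list roman_decimals (simplify_decimal_list roman_decimals)

-- ===== LEMMAS AND PROOFS =====

-- proof-side reformulation of B's second pass: the suffix maximum recomputed structurally
def passB : List Int → Int → List Int
  | [], _ => []
  | x :: xs, acc =>
    match PySem.List.max? xs (fun y => y) with
    | none => (x - acc) :: passB xs 0
    | some m =>
      if x ≥ m then (x - acc) :: passB xs 0
      else passB xs (acc + x)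

lemma pyGet0 (x : Int) (xs : List Int) : (PySem.List.pyGet? (x :: xs) 0).getD 0 = x := by
  simp [PySem.List.pyGet?, PySem.List.pyIdx?]

lemma foldl_sub (r : List Int) (c : Int) :
    r.foldl (fun a n => a - n) c = c - r.sum := by
  induction r generalizing c with
  | nil => simp
  | cons y ys ih => simp [List.foldl_cons, ih, List.sum_cons]; ring

lemma max?_id_cons_some {x M : Int} {xs : List Int}
    (h : PySem.List.max? xs (fun y => y) = some M) :
    PySem.List.max? (x :: xs) (fun y => y) = some (max x M) := by
  cases xs with
  | nil =>
    rw [show PySem.List.max? ([]:List Int) (fun y => y) = none from rfl] at h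
    simp at h
  | cons y ys =>
    rw [PySem.List.max?_id_cons] at h ⊢
    have hfold : List.foldl max x (y :: ys) = max x (List.foldl max y ys) := by
      show List.foldl max (max x y) ys = _
      exact List.foldl_assoc
    simp only [Option.some.injEq] at h ⊢
    rw [hfold, h]

lemma max?_singleton (x : Int) : PySem.List.max? [x] (fun y => y) = some x := by
  rw [PySem.List.max?_id_cons]
  rfl

-- A's group length, uniformly: one past the first index of the maximum
lemma e_eq_idx {M : Int} (l : List Int) (hM : PySem.List.max? l (fun y => y) = some M) :
    length_of_next_numeral l = (PySem.List.index? l M).getD 0 + 1 := by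
  cases l with
  | nil => rw [show (PySem.List.max? ([]:List Int) (fun y => y)) = none from rfl] at hM; simp at hM
  | cons y ys =>
    unfold length_of_next_numeral
    rw [hM]
    show (if (PySem.List.pyGet? (y :: ys) 0).getD 0 ≥ M then 1
          else (PySem.List.index? (y :: ys) M).getD 0 + 1) = _
    rw [pyGet0]
    by_cases hy : y ≥ M
    · have hyM : y = M := le_antisymm (PySem.List.max?_isMax hM y (by simp)) hy
      subst hyM
      rw [if_pos hy, PySem.List.index?_cons_self]
      rfl
    · rw [if_neg hy]

-- A's group value, uniformly: the maximum minus the sum of the other group members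
lemma simp_num_val {M : Int} {g r : List Int}
    (hM : PySem.List.max? g (fun y => y) = some M)
    (hr : PySem.List.remove? g M = some r) :
    simplify_numeral_by_subtraction g = M - r.sum := by
  unfold simplify_numeral_by_subtraction
  by_cases h1 : g.length = 1
  · cases g with
    | nil => simp at h1
    | cons y ys =>
      have hys : ys = [] := by simpa using h1
      subst hys
      have hyM : y = M := by rw [PySem.List.max?_id_cons] at hM; simpa using hM
      subst hyM
      rw [PySem.List.remove?_cons_self] at hr
      have hre : r = [] := by simpa using hr.symm
      subst hre
      rw [if_pos h1, pyGet0]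
      simp
  · rw [if_neg h1, hM]
    show ((PySem.List.remove? g M).getD g).foldl (fun a n => a - n) M = _
    rw [hr]
    simp only [Option.getD_some]
    rw [foldl_sub]

lemma e_singleton (x : Int) : length_of_next_numeral [x] = 1 := by
  rw [e_eq_idx [x] (max?_singleton x), PySem.List.index?_cons_self]
  rfl

lemma simp_num_singleton (x : Int) : simplify_numeral_by_subtraction [x] = x := by
  rw [simp_num_val (max?_singleton x) (PySem.List.remove?_cons_self x [])]
  simp

lemma headD_suffix_maxes (l : List Int) :
    (suffix_maxes l).headD none = PySem.List.max? l (fun y => y) := by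
  induction l with
  | nil => rfl
  | cons x xs ih =>
    have hstep : (suffix_maxes (x :: xs)).headD none =
        some (match (suffix_maxes xs).headD none with
              | some nxt => if nxt > x then nxt else x
              | none => x) := rfl
    rw [hstep, ih]
    cases hx : PySem.List.max? xs (fun y => y) with
    | none =>
      have hxs : xs = [] := (PySem.List.max?_eq_none_iff xs _).mp hx
      subst hxs
      exact (max?_singleton x).symm
    | some M =>
      rw [max?_id_cons_some hx]
      show some (if M > x then M else x) = some (max x M)
      congr 1
      by_cases h : M > x
      · rw [if_pos h, max_eq_right (le_of_lt h)]
      · rw [if_neg h, max_eq_left (by omega)]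

lemma sweep_eq_passB (l : List Int) (acc : Int) :
    sweep l (suffix_maxes l).tail acc = passB l acc := by
  induction l generalizing acc with
  | nil => rfl
  | cons x xs ih =>
    show (match (suffix_maxes xs).headD none with
      | none => (x - acc) :: sweep xs (suffix_maxes xs).tail 0
      | some nxt =>
        if x ≥ nxt then (x - acc) :: sweep xs (suffix_maxes xs).tail 0
        else sweep xs (suffix_maxes xs).tail (acc + x)) = _
    rw [headD_suffix_maxes, ih, ih]
    rfl

-- A's group length grows by one when an element below the maximum is prepended
lemma e_cons {x M : Int} {xs : List Int}
    (hM : PySem.List.max? xs (fun y => y) = some M) (hx : x < M) :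
    length_of_next_numeral (x :: xs) = length_of_next_numeral xs + 1 := by
  have hmem : M ∈ xs := PySem.List.max?_mem hM
  have hne : x ≠ M := by omega
  obtain ⟨j, hj⟩ : ∃ j, PySem.List.index? xs M = some j :=
    Option.isSome_iff_exists.mp ((PySem.List.index?_isSome_iff xs M).mpr hmem)
  have hMx : PySem.List.max? (x :: xs) (fun y => y) = some M := by
    rw [max?_id_cons_some hM, max_eq_right (le_of_lt hx)]
  rw [e_eq_idx (x :: xs) hMx, e_eq_idx xs hM,
      PySem.List.index?_cons_of_ne xs hne, hj]
  rfl

-- A's group value grows by "− x" when an element below the maximum is prepended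
lemma simp_num_cons {x M : Int} {g : List Int}
    (hM : PySem.List.max? g (fun y => y) = some M) (hx : x < M) :
    simplify_numeral_by_subtraction (x :: g) = simplify_numeral_by_subtraction g - x := by
  have hmem : M ∈ g := PySem.List.max?_mem hM
  have hne : x ≠ M := by omega
  obtain ⟨r, hr⟩ : ∃ r, PySem.List.remove? g M = some r := by
    have h : PySem.List.remove? g M ≠ none := fun h =>
      ((PySem.List.remove?_eq_none_iff g M).mp h) hmem
    exact Option.ne_none_iff_exists'.mp h
  have hMx : PySem.List.max? (x :: g) (fun y => y) = some M := by
    rw [max?_id_cons_some hM, max_eq_right (le_of_lt hx)]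
  have hrx : PySem.List.remove? (x :: g) M = some (x :: r) := by
    rw [PySem.List.remove?_cons_of_ne g hne, hr]
    rfl
  rw [simp_num_val hMx hrx, simp_num_val hM hr, List.sum_cons]
  ring

-- the first group of l ends at (and therefore carries) the maximum of all of l
lemma max?_take_e (l : List Int) (hl : l ≠ []) :
    PySem.List.max? (l.take (length_of_next_numeral l)) (fun y => y)
      = PySem.List.max? l (fun y => y) := by
  induction l with
  | nil => exact absurd rfl hl
  | cons x xs ih =>
    cases hx : PySem.List.max? xs (fun y => y) with
    | none =>
      have hxs : xs = [] := (PySem.List.max?_eq_none_iff xs _).mp hx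
      subst hxs
      rw [e_singleton]
      rfl
    | some M =>
      have hxs : xs ≠ [] := by 
        intro h
        subst h
        rw [show PySem.List.max? ([]:List Int) (fun y => y) = none from rfl] at hx
        simp at hx
      by_cases hge : x ≥ M
      · have hmax : PySem.List.max? (x :: xs) (fun y => y) = some x := by
          rw [max?_id_cons_some hx, max_eq_left hge]
        have he : length_of_next_numeral (x :: xs) = 1 := by
          rw [e_eq_idx (x :: xs) hmax, PySem.List.index?_cons_self]
          rfl
        rw [he, hmax, show (x :: xs).take 1 = [x] from rfl, max?_singleton]
      · have hxlt : x < M := by omega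
        rw [e_cons hx hxlt]
        have htake : (x :: xs).take (length_of_next_numeral xs + 1)
            = x :: xs.take (length_of_next_numeral xs) := rfl
        rw [htake, max?_id_cons_some ((ih hxs).trans hx), max?_id_cons_some hx]

-- main group lemma: passB consumes exactly A's next numeral and produces A's value for it
lemma passB_group (l : List Int) (hl : l ≠ []) (acc : Int) :
    passB l acc
      = (simplify_numeral_by_subtraction (l.take (length_of_next_numeral l)) - acc)
          :: passB (l.drop (length_of_next_numeral l)) 0 := by
  induction l generalizing acc with
  | nil => exact absurd rfl hl
  | cons x xs ih =>
    cases hx : PySem.List.max? xs (fun y => y) with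
    | none =>
      have hxs : xs = [] := (PySem.List.max?_eq_none_iff xs _).mp hx
      subst hxs
      show (x - acc) :: passB [] 0 = _
      rw [e_singleton, show List.take 1 [x] = [x] from rfl, simp_num_singleton]
      rfl
    | some M =>
      have hxs : xs ≠ [] := by 
        intro h
        subst h
        rw [show PySem.List.max? ([]:List Int) (fun y => y) = none from rfl] at hx
        simp at hx
      show (match PySem.List.max? xs (fun y => y) with
        | none => (x - acc) :: passB xs 0
        | some m => if x ≥ m then (x - acc) :: passB xs 0 else passB xs (acc + x)) = _
      rw [hx]
      show (if x ≥ M then (x - acc) :: passB xs 0 else passB xs (acc + x)) = _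
      by_cases hge : x ≥ M
      · rw [if_pos hge]
        have hmax : PySem.List.max? (x :: xs) (fun y => y) = some x := by
          rw [max?_id_cons_some hx, max_eq_left hge]
        have he : length_of_next_numeral (x :: xs) = 1 := by
          rw [e_eq_idx (x :: xs) hmax, PySem.List.index?_cons_self]
          rfl
        rw [he, show (x :: xs).take 1 = [x] from rfl, simp_num_singleton]
        rfl
      · have hxlt : x < M := by omega
        rw [if_neg hge, ih hxs (acc + x), e_cons hx hxlt]
        have htake : (x :: xs).take (length_of_next_numeral xs + 1)
            = x :: xs.take (length_of_next_numeral xs) := rfl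
        have hdrop : (x :: xs).drop (length_of_next_numeral xs + 1)
            = xs.drop (length_of_next_numeral xs) := rfl
        rw [htake, hdrop]
        have hgmax : PySem.List.max? (xs.take (length_of_next_numeral xs)) (fun y => y)
            = some M := (max?_take_e xs hxs).trans hx
        rw [simp_num_cons hgmax hxlt]
        congr 1
        ring

lemma simplify_eq_passB : ∀ (n : Nat) (l : List Int), l.length ≤ n →
    simplify_decimal_list l = passB l 0 := by
  intro n
  induction n with
  | zero =>
    intro l hl
    have hnil : l = [] := List.eq_nil_of_length_eq_zero (by omega)
    subst hnil
    rw [simplify_decimal_list]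
    rfl
  | succ k ih =>
    intro l hl
    cases l with
    | nil => rw [simplify_decimal_list]; rfl
    | cons x xs =>
      rw [simplify_decimal_list]
      rw [if_pos (by simp : 0 < (x :: xs).length)]
      have hlen : ((x :: xs).drop (length_of_next_numeral (x :: xs))).length ≤ k := by
        have hp := length_of_next_numeral_pos (x :: xs)
        rw [List.length_drop, List.length_cons]
        simp only [List.length_cons] at hl
        omega
      rw [ih _ hlen, passB_group (x :: xs) (by simp) 0]
      simp

-- ===== VERDICT (by name: the statement is the Claim_ definition above) =====
theorem simplify_decimal_list_spec : Claim_equal_simplify_decimal_list := by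
  intro l _
  unfold Spec_simplify_decimal_list simplify_decimal_list_alt
  rw [sweep_eq_passB, simplify_eq_passB l.length l (le_refl _)]
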